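-- pv_equiv track=rewrite | github.com/F1gueron/Design-and-Analysis-of-Algorithms | Tema 3/order_tasks.py | order_tasks
-- ===== SOURCE A (Python) =====
-- def get_best_task(candidates, tasks):
--     best_time_task = 0x3f3f3f3f
--     best_task = 0
--     for c in candidates:
--         time = tasks[c]
--         if time < best_time_task:
--             best_time_task = time
--             best_task = c
--     return best_task
--
-- def order_tasks(tasks):
--     candidates = set()
--     n = len(tasks)
--     for i in range(n):
--         candidates.add(i)
--     sol = []
--     while candidates:
--         best_task = get_best_task(candidates,tasks)
--         candidates.remove(best_task)
--         sol.append(best_task)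
--     return sol
-- ===== SOURCE B (Python) =====
-- def order_tasks(tasks):
--     return sorted(range(len(tasks)), key=lambda i: tasks[i])
-- ===== Notes on version B (the rewrite author's own statement) =====
-- stated objective: faster
-- what changed: Replaces the O(n^2) repeated selection of the best remaining candidate from a set by a single stable sort of the indices keyed by their task time.
import Mathlib
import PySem

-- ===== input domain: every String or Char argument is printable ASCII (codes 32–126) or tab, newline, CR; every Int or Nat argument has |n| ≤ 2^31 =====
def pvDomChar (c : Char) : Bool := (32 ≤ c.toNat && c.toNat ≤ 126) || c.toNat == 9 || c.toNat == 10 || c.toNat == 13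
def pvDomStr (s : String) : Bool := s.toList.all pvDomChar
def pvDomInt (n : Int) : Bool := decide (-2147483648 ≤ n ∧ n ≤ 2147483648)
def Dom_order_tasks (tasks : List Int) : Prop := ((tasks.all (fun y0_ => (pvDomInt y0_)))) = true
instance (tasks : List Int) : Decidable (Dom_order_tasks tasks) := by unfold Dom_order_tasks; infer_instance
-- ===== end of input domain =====

-- B replaces A's quadratic repeated best-candidate selection by one stable sort of the
-- indices keyed by task time (asymptotically faster).

-- ===== PORT A =====
-- tasks[c] is read with pyGet?; every candidate is an index produced by range(len(tasks)),
-- so the lookup is always in range and `.getD 0` is exact.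
def get_best_task (candidates : List Int) (tasks : List Int) : Int :=
  (candidates.foldl
    (fun st c =>
      let time := (PySem.List.pyGet? tasks c).getD 0
      if time < st.1 then (time, c) else st)
    ((1061109567 : Int), (0 : Int))).2

-- the 'while candidates:' loop; when best_task is no longer a candidate Python raises
-- KeyError (candidates.remove), which Pre_ excludes: the port returns sol there.
def orderLoopA (tasks : List Int) (cands : List Int) (sol : List Int) : List Int :=
  match hc : cands with
  | [] => sol
  | c :: cs =>
    let best := get_best_task (c :: cs) tasks
    match h : PySem.Set.remove? (c :: cs) best with
    | none => sol
    | some cands' => orderLoopA tasks cands' (sol ++ [best])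
termination_by cands.length
decreasing_by
  simp only [PySem.Set.remove?] at h
  split at h
  · cases h
    subst hc
    rename_i hmem
    simp only [PySem.Set.discard]
    refine List.length_filter_lt_length_iff_exists.mpr ?_
    exact ⟨best, by simpa [PySem.Set.contains] using hmem, by simp⟩
  · cases h

def order_tasks (tasks : List Int) : List Int :=
  let n : Int := tasks.length
  let candidates := (PySem.List.pyRange 0 n).foldl PySem.Set.add PySem.Set.empty
  orderLoopA tasks candidates []

-- ===== PORT B =====
-- sorted(range(len(tasks)), key=lambda i: tasks[i]); the key lookup is always in range,
-- `.getD 0` is exact.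
def order_tasks_alt (tasks : List Int) : List Int :=
  PySem.List.sorted (PySem.List.pyRange 0 tasks.length)
    (fun i => (PySem.List.pyGet? tasks i).getD 0)

-- ===== PRECONDITION & SPEC =====
-- Pre_ excludes exactly the inputs where A raises KeyError: if some task after the first
-- has time ≥ 0x3f3f3f3f, get_best_task eventually returns its sentinel default index 0
-- after 0 was already removed, and candidates.remove(0) raises.
def Pre_order_tasks (tasks : List Int) : Prop :=
  ∀ x ∈ tasks.drop 1, x < 1061109567
instance (tasks : List Int) : Decidable (Pre_order_tasks tasks) := by
  unfold Pre_order_tasks; infer_instance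

def pvWitness_order_tasks : List Int := [3, 1, 2]

def Spec_order_tasks (tasks : List Int) (out : List Int) : Prop := out = order_tasks_alt tasks
instance (tasks : List Int) (out : List Int) : Decidable (Spec_order_tasks tasks out) := by
  unfold Spec_order_tasks; infer_instance

-- ===== CLAIM (what is proved, stated in full; the proofs are below) =====
def Claim_equal_order_tasks : Prop := ∀ (tasks : List Int), Dom_order_tasks tasks → Pre_order_tasks tasks → Spec_order_tasks tasks (order_tasks tasks)

-- ===== LEMMAS AND PROOFS =====

-- two insertions into an insertion-sorted accumulator commute when the keys are strictly ordered
theorem pv_ins_comm (key : Int → Int) (x y : Int) (h : key y < key x) (A : List Int) :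
    PySem.List.insertBy (fun a b => decide (key a < key b)) y
      (PySem.List.insertBy (fun a b => decide (key a < key b)) x A)
    = PySem.List.insertBy (fun a b => decide (key a < key b)) x
      (PySem.List.insertBy (fun a b => decide (key a < key b)) y A) := by
  induction A with
  | nil =>
    simp [PySem.List.insertBy, not_lt.mpr (le_of_lt h), h]
  | cons a A ih =>
    by_cases hy : key y < key a
    · have hx : ¬ key x < key a → True := fun _ => trivial
      by_cases hxa : key x < key a
      · simp [PySem.List.insertBy, hy, hxa, h, not_lt.mpr (le_of_lt h)]
      · simp [PySem.List.insertBy, hy, hxa, h, not_lt.mpr (le_of_lt h)]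
    · have hxa : ¬ key x < key a := fun hc => hy (lt_trans h hc)
      simp [PySem.List.insertBy, hy, hxa, ih]

-- folding insertions over elements none of which go before x keeps x at the head
theorem pv_foldl_ins_cons (key : Int → Int) (x : Int) (t : List Int)
    (h : ∀ y ∈ t, ¬ key y < key x) (acc : List Int) :
    t.foldl (fun acc z => PySem.List.insertBy (fun a b => decide (key a < key b)) z acc) (x :: acc)
    = x :: t.foldl (fun acc z => PySem.List.insertBy (fun a b => decide (key a < key b)) z acc) acc := by
  induction t generalizing acc with
  | nil => rfl
  | cons a t ih =>
    simp only [List.foldl_cons]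
    rw [show PySem.List.insertBy (fun a b => decide (key a < key b)) a (x :: acc)
        = x :: PySem.List.insertBy (fun a b => decide (key a < key b)) a acc by
      simp [PySem.List.insertBy, h a (by simp)]]
    exact ih (fun y hy => h y (by simp [hy])) _

-- a head that no later element strictly beats stays first in the stable sort
theorem pv_sorted_cons_min (key : Int → Int) (x : Int) (t : List Int)
    (h : ∀ y ∈ t, ¬ key y < key x) :
    PySem.List.sorted (x :: t) key = x :: PySem.List.sorted t key := by
  rw [PySem.List.sorted_eq_foldl_insertBy, PySem.List.sorted_eq_foldl_insertBy]
  simp only [List.foldl_cons]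
  rw [show PySem.List.insertBy (fun a b => decide (key a < key b)) x [] = [x] from rfl]
  exact pv_foldl_ins_cons key x t h []

-- swapping a strictly out-of-order adjacent pair does not change the stable sort
theorem pv_sorted_swap (key : Int → Int) (u : List Int) (x y : Int) (v : List Int)
    (h : key y < key x) :
    PySem.List.sorted (u ++ x :: y :: v) key = PySem.List.sorted (u ++ y :: x :: v) key := by
  rw [PySem.List.sorted_eq_foldl_insertBy, PySem.List.sorted_eq_foldl_insertBy]
  simp only [List.foldl_append, List.foldl_cons]
  rw [pv_ins_comm key x y h]

-- an element strictly smaller than everything before it may be bubbled to the front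
theorem pv_sorted_bubble (key : Int → Int) (m : Int) :
    ∀ (p : List Int), (∀ y ∈ p, key m < key y) →
    ∀ (u s : List Int),
    PySem.List.sorted (u ++ p ++ m :: s) key = PySem.List.sorted (u ++ (m :: (p ++ s))) key := by
  intro p
  induction p with
  | nil => intro _ u s; simp
  | cons x p ih =>
    intro hp u s
    have h1 : u ++ (x :: p) ++ m :: s = (u ++ [x]) ++ p ++ m :: s := by simp
    rw [h1, ih (fun y hy => hp y (by simp [hy])) (u ++ [x]) s]
    have h2 : (u ++ [x]) ++ (m :: (p ++ s)) = u ++ x :: m :: (p ++ s) := by simp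
    rw [h2, pv_sorted_swap key u x m (p ++ s) (hp x (by simp))]
    simp

-- the first minimum heads the stable sort, the rest sort without it
theorem pv_sorted_firstmin (key : Int → Int) (p : List Int) (m : Int) (s : List Int)
    (hp : ∀ y ∈ p, key m < key y) (hmin : ∀ y ∈ p ++ m :: s, key m ≤ key y) :
    PySem.List.sorted (p ++ m :: s) key = m :: PySem.List.sorted (p ++ s) key := by
  have := pv_sorted_bubble key m p hp [] s
  simp only [List.nil_append] at this
  rw [this, pv_sorted_cons_min key m (p ++ s)]
  intro y hy
  have : y ∈ p ++ m :: s := by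
    rcases List.mem_append.mp hy with h | h
    · exact List.mem_append.mpr (Or.inl h)
    · exact List.mem_append.mpr (Or.inr (by simp [h]))
  exact not_lt.mpr (hmin y this)

-- every nonempty list decomposes around its first key-minimal element
theorem pv_exists_firstmin (key : Int → Int) :
    ∀ (l : List Int), l ≠ [] →
    ∃ p m s, l = p ++ m :: s ∧ (∀ y ∈ p, key m < key y) ∧ (∀ y ∈ l, key m ≤ key y) := by
  intro l
  induction l with
  | nil => intro h; exact absurd rfl h
  | cons x t ih =>
    intro _
    rcases t.eq_nil_or_concat' with rfl | hne
    · exact ⟨[], x, [], by simp⟩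
    · have htne : t ≠ [] := by rcases hne with ⟨a, b, rfl⟩; simp
      obtain ⟨p, m, s, heq, hp, hmin⟩ := ih htne
      by_cases hxm : key x ≤ key m
      · refine ⟨[], x, t, by simp, by simp, ?_⟩
        intro y hy
        rcases List.mem_cons.mp hy with rfl | hy
        · exact le_refl _
        · exact le_trans hxm (hmin y hy)
      · push_neg at hxm
        refine ⟨x :: p, m, s, by simp [heq], ?_, ?_⟩
        · intro y hy
          rcases List.mem_cons.mp hy with rfl | hy
          · exact hxm
          · exact hp y hy
        · intro y hy
          rcases List.mem_cons.mp hy with rfl | hy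
          · exact le_of_lt hxm
          · exact hmin y (heq ▸ hy)

-- get_best_task returns the first key-minimal candidate when its key beats the sentinel
theorem pv_gb_fix (tasks : List Int) (l : List Int) (st : Int × Int)
    (h : ∀ y ∈ l, ¬ (PySem.List.pyGet? tasks y).getD 0 < st.1) :
    l.foldl (fun st c =>
      let time := (PySem.List.pyGet? tasks c).getD 0
      if time < st.1 then (time, c) else st) st = st := by
  induction l with
  | nil => rfl
  | cons a l ih =>
    simp only [List.foldl_cons]
    rw [if_neg (h a (by simp))]
    exact ih (fun y hy => h y (by simp [hy]))

theorem pv_gb_inv (tasks : List Int) (m : Int) (l : List Int) (st : Int × Int)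
    (h : ∀ y ∈ l, (PySem.List.pyGet? tasks m).getD 0 < (PySem.List.pyGet? tasks y).getD 0)
    (hst : (PySem.List.pyGet? tasks m).getD 0 < st.1) :
    (PySem.List.pyGet? tasks m).getD 0 <
      (l.foldl (fun st c =>
        let time := (PySem.List.pyGet? tasks c).getD 0
        if time < st.1 then (time, c) else st) st).1 := by
  induction l generalizing st with
  | nil => exact hst
  | cons a l ih =>
    simp only [List.foldl_cons]
    by_cases ha : (PySem.List.pyGet? tasks a).getD 0 < st.1
    · simp only [if_pos ha]
      exact ih _ (fun y hy => h y (by simp [hy])) (h a (by simp))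
    · simp only [if_neg ha]
      exact ih _ (fun y hy => h y (by simp [hy])) hst

theorem pv_gb_eq (tasks : List Int) (p : List Int) (m : Int) (s : List Int)
    (hm : (PySem.List.pyGet? tasks m).getD 0 < 1061109567)
    (hp : ∀ y ∈ p, (PySem.List.pyGet? tasks m).getD 0 < (PySem.List.pyGet? tasks y).getD 0)
    (hs : ∀ y ∈ s, (PySem.List.pyGet? tasks m).getD 0 ≤ (PySem.List.pyGet? tasks y).getD 0) :
    get_best_task (p ++ m :: s) tasks = m := by
  unfold get_best_task
  rw [List.foldl_append, List.foldl_cons]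
  have h1 := pv_gb_inv tasks m p ((1061109567 : Int), (0 : Int)) hp hm
  rw [if_pos h1]
  rw [pv_gb_fix tasks s _ (fun y hy => not_lt.mpr (hs y hy))]

-- removing the first minimum from the candidate set
theorem pv_remove_eq (p : List Int) (m : Int) (s : List Int)
    (hmp : m ∉ p) (hms : m ∉ s) :
    PySem.Set.remove? (p ++ m :: s) m = some (p ++ s) := by
  have hc : PySem.Set.contains (p ++ m :: s) m = true := by
    simp [PySem.Set.contains]
  simp only [PySem.Set.remove?, hc, if_pos]
  congr 1
  simp only [PySem.Set.discard, List.filter_append, List.filter_cons]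
  simp only [beq_self_eq_true, Bool.not_true]
  rw [List.filter_eq_self.mpr, List.filter_eq_self.mpr]
  · simp
  · intro a ha
    simp only [Bool.not_eq_eq_eq_not, Bool.not_true, beq_eq_false_iff_ne, ne_eq]
    exact fun h => hms (h ▸ ha)
  · intro a ha
    simp only [Bool.not_eq_eq_eq_not, Bool.not_true, beq_eq_false_iff_ne, ne_eq]
    exact fun h => hmp (h ▸ ha)

-- the selection loop performs a stable selection sort
theorem pv_main (tasks : List Int) :
    ∀ (N : Nat) (cands : List Int), cands.length ≤ N → cands.Nodup →
    (∀ c ∈ cands, c ≠ 0 → (PySem.List.pyGet? tasks c).getD 0 < 1061109567) →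
    ∀ (sol : List Int),
    orderLoopA tasks cands sol
      = sol ++ PySem.List.sorted cands (fun i => (PySem.List.pyGet? tasks i).getD 0) := by
  intro N
  induction N with
  | zero =>
    intro cands hlen _ _ sol
    have hc : cands = [] := List.eq_nil_of_length_eq_zero (Nat.le_zero.mp hlen)
    subst hc
    simp [orderLoopA, PySem.List.sorted]
  | succ N ih =>
    intro cands hlen hnd hinv sol
    match cands, hlen, hnd, hinv with
    | [], _, _, _ =>
      simp [orderLoopA, PySem.List.sorted]
    | c :: cs, hlen, hnd, hinv =>
      by_cases hex : ∃ d ∈ c :: cs, (PySem.List.pyGet? tasks d).getD 0 < 1061109567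
      · obtain ⟨p, m, s, heq, hp, hmin⟩ :=
          pv_exists_firstmin (fun i => (PySem.List.pyGet? tasks i).getD 0) (c :: cs) (by simp)
        obtain ⟨d, hd, hdlt⟩ := hex
        have hm : (PySem.List.pyGet? tasks m).getD 0 < 1061109567 :=
          lt_of_le_of_lt (hmin d hd) hdlt
        have hbest : get_best_task (c :: cs) tasks = m := by
          rw [heq]
          exact pv_gb_eq tasks p m s hm hp
            (fun y hy => hmin y (heq ▸ (List.mem_append.mpr (Or.inr (by simp [hy])))))
        have hnd' : (p ++ m :: s).Nodup := heq ▸ hnd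
        have hmp : m ∉ p := fun hmem => lt_irrefl _ (hp m hmem)
        have hms : m ∉ s := by
          have := (List.nodup_append.mp hnd').2.1
          exact (List.nodup_cons.mp this).1
        have hrem : PySem.Set.remove? (c :: cs) m = some (p ++ s) := by
          rw [heq]; exact pv_remove_eq p m s hmp hms
        rw [orderLoopA]
        have hlen' : (p ++ s).length ≤ N := by
          have h2 : (c :: cs).length = (p ++ m :: s).length := by rw [heq]
          simp only [List.length_cons, List.length_append] at h2 hlen ⊢
          omega
        have hnd'' : (p ++ s).Nodup :=
          (((List.sublist_cons_self m s).append_left p).nodup) hnd'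
        have hinv' : ∀ c' ∈ p ++ s, c' ≠ 0 →
            (PySem.List.pyGet? tasks c').getD 0 < 1061109567 := by
          intro c' hc' hne
          refine hinv c' ?_ hne
          rw [heq]
          rcases List.mem_append.mp hc' with h | h
          · exact List.mem_append.mpr (Or.inl h)
          · exact List.mem_append.mpr (Or.inr (by simp [h]))
        split
        · rename_i hnone
          rw [hbest, hrem] at hnone
          cases hnone
        · rename_i cands' hsome
          rw [hbest, hrem] at hsome
          injection hsome with hsome
          subst hsome
          rw [hbest]
          rw [ih (p ++ s) hlen' hnd'' hinv' (sol ++ [m])]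
          rw [heq, pv_sorted_firstmin (fun i => (PySem.List.pyGet? tasks i).getD 0) p m s hp (heq ▸ hmin)]
          simp
      · push_neg at hex
        have hall0 : ∀ x ∈ c :: cs, x = (0 : Int) := by
          intro x hx
          by_contra hne
          exact absurd (hinv x hx hne) (not_lt.mpr (hex x hx))
        have hc0 : c = 0 := hall0 c (by simp)
        have hcs : cs = [] := by
          rw [List.eq_nil_iff_forall_not_mem]
          intro a ha
          have ha0 : a = 0 := hall0 a (by simp [ha])
          subst hc0
          exact (List.nodup_cons.mp hnd).1 (ha0 ▸ ha)
        subst hcs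
        subst hc0
        have hbest : get_best_task [(0 : Int)] tasks = 0 := by
          simp only [get_best_task, List.foldl_cons, List.foldl_nil]
          split <;> rfl
        have hrem : PySem.Set.remove? ([(0 : Int)]) (0 : Int) = some [] := by decide
        rw [orderLoopA]
        split
        · rename_i hnone
          rw [hbest, hrem] at hnone
          cases hnone
        · rename_i cands' hsome
          rw [hbest, hrem] at hsome
          injection hsome with hsome
          subst hsome
          rw [hbest]
          simp only [orderLoopA]
          rw [pv_sorted_cons_min (fun i => (PySem.List.pyGet? tasks i).getD 0) 0 [] (by simp)]
          simp [PySem.List.sorted]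

-- building the candidate set from range(n) is range(n) itself
theorem pv_ofList_nodup : ∀ (l : List Int), l.Nodup →
    ∀ (s : List Int), (∀ x ∈ l, x ∉ s) → l.foldl PySem.Set.add s = s ++ l := by
  intro l
  induction l with
  | nil => intro _ s _; simp
  | cons x t ih =>
    intro hnd s hs
    simp only [List.foldl_cons]
    have hadd : PySem.Set.add s x = s ++ [x] := by
      simp only [PySem.Set.add, PySem.Set.contains]
      rw [if_neg]
      simp only [List.contains_eq_mem, decide_eq_true_eq]
      exact fun h => hs x (by simp) h
    rw [hadd, ih hnd.of_cons (s ++ [x])]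
    · simp
    · intro y hy
      simp only [List.mem_append, List.mem_singleton]
      rintro (h | rfl)
      · exact hs y (by simp [hy]) h
      · exact (List.nodup_cons.mp hnd).1 hy

-- ===== VERDICT (by name: the statement is the Claim_ definition above) =====
theorem order_tasks_spec : Claim_equal_order_tasks := by
  intro tasks _ hpre
  unfold Spec_order_tasks order_tasks order_tasks_alt
  have hcand : (PySem.List.pyRange 0 (tasks.length : Int)).foldl PySem.Set.add PySem.Set.empty
      = PySem.List.pyRange 0 (tasks.length : Int) := by
    have := pv_ofList_nodup (PySem.List.pyRange 0 (tasks.length : Int))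
      (PySem.List.nodup_pyRange_one 0 (tasks.length : Int)) [] (by simp)
    simpa [PySem.Set.empty] using this
  simp only [hcand]
  rw [pv_main tasks (PySem.List.pyRange 0 (tasks.length : Int)).length _ le_rfl
    (PySem.List.nodup_pyRange_one 0 (tasks.length : Int)) ?_ []]
  · simp
  · intro c hc hne
    obtain ⟨h0, hlt⟩ := PySem.List.mem_pyRange_one.mp hc
    have hcn : c = ((c.toNat : Nat) : Int) := by omega
    rw [hcn, PySem.List.pyGet?_natCast]
    have hlt' : c.toNat < tasks.length := by omega
    have h1 : 1 ≤ c.toNat := by omega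
    rw [List.getElem?_eq_getElem hlt']
    simp only [Option.getD_some]
    have hdl : c.toNat - 1 < (tasks.drop 1).length := by
      simp [List.length_drop]; omega
    have hix : tasks[c.toNat] = (tasks.drop 1)[c.toNat - 1]'hdl := by
      rw [List.getElem_drop]
      congr 1
      omega
    rw [hix]
    exact hpre _ (List.getElem_mem hdl)
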